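-- pv_equiv track=rewrite | github.com/Decadentvc/TSF-Imputation-Analysis | Eval/run_batch_eval.py | _split_multi_values
-- ===== SOURCE A (Python) =====
-- from typing import Iterable, List, Optional
--
-- def _split_multi_values(raw_values: Optional[List[str]]) -> Optional[List[str]]:
--     """支持空格分隔与逗号分隔混用。"""
--     if not raw_values:
--         return None
--
--     values: List[str] = []
--     for chunk in raw_values:
--         for part in chunk.split(","):
--             item = part.strip()
--             if item:
--                 values.append(item)
--     return values if values else None
-- ===== SOURCE B (Python) =====
-- from typing import List, Optional
--
--
-- def _split_multi_values(raw_values: Optional[List[str]]) -> Optional[List[str]]: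
--     """Character-level tokenizer: one pass over each string's characters with an
--     explicit state machine (committed chars + pending whitespace), no split/strip."""
--     if not raw_values:
--         return None
--     values: List[str] = []
--     for chunk in raw_values:
--         tok: List[str] = []   # committed characters of the current token
--         pend: List[str] = []  # whitespace seen after the committed part
--         for ch in chunk + ",":
--             if ch == ",":
--                 if tok:
--                     values.append("".join(tok))
--                 tok = []
--                 pend = []
--             elif ch.isspace():
--                 if tok:
--                     pend.append(ch)
--             else:
--                 tok.extend(pend)
--                 tok.append(ch)
--                 pend = []
--     return values if values else None
-- ===== Notes on version B (the rewrite author's own statement) =====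
-- stated objective: alternative
-- what changed: Replaces A's split(',')/strip()/filter pipeline with a character-level state machine: one pass over each string's characters, committing token characters and buffering pending whitespace, emitting a token at each comma; no split/strip/join calls.
import Mathlib
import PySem

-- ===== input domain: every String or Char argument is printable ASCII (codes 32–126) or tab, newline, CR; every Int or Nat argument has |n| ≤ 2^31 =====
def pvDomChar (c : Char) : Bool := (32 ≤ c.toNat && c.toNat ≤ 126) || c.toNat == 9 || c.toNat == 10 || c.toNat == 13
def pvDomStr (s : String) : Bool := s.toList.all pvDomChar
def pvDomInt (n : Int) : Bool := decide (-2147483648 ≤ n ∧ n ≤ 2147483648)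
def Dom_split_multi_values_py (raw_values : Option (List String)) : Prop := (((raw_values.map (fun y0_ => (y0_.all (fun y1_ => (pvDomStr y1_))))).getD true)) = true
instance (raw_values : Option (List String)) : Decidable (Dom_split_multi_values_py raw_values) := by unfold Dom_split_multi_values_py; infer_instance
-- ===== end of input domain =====

-- B replaces A's split/strip pipeline by a character-level state machine: one pass over each
-- string's characters, committing token chars and buffering pending whitespace (objective: alternative).

-- ===== PORT A =====
-- chunk.split(",") has a nonempty literal separator, so Str.split? is always `some`; .getD [] is exact here.
def split_multi_values_py (raw_values : Option (List String)) : Option (List String) :=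
  match raw_values with
  | none => none
  | some lst =>
    if lst.isEmpty then none
    else
      let values := lst.foldl (fun values chunk =>
        ((PySem.Str.split? chunk ",").getD []).foldl (fun values part =>
          let item := PySem.Str.strip part
          if item ≠ "" then values ++ [item] else values) values) []
      if values.isEmpty then none else some values

-- ===== PORT B =====
-- B-side helper: the body of Source B's inner character loop (state = (values, tok, pend)).
def bstep (st : List String × List Char × List Char) (ch : Char) : List String × List Char × List Char :=
  match st with
  | (values, tok, pend) =>
    if ch = ',' then
      (if tok ≠ [] then values ++ [String.ofList tok] else values, [], [])
    else if PySem.Chars.isspace ch then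
      (values, tok, if tok ≠ [] then pend ++ [ch] else pend)
    else
      (values, tok ++ pend ++ [ch], [])

def split_multi_values_py_alt (raw_values : Option (List String)) : Option (List String) :=
  match raw_values with
  | none => none
  | some lst =>
    if lst.isEmpty then none
    else
      let values := lst.foldl (fun values chunk =>
        ((chunk.toList ++ [',']).foldl bstep (values, [], [])).1) []
      if values.isEmpty then none else some values

-- ===== PRECONDITION & SPEC =====
def Spec_split_multi_values_py (raw_values : Option (List String)) (out : Option (List String)) : Prop := out = split_multi_values_py_alt raw_values
instance (raw_values : Option (List String)) (out : Option (List String)) : Decidable (Spec_split_multi_values_py raw_values out) := by unfold Spec_split_multi_values_py; infer_instance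

-- ===== CLAIM (what is proved, stated in full; the proofs are below) =====
def Claim_equal_split_multi_values_py : Prop := ∀ (raw_values : Option (List String)), Dom_split_multi_values_py raw_values → Spec_split_multi_values_py raw_values (split_multi_values_py raw_values)

-- ===== LEMMAS AND PROOFS =====

/-- Simple structural single-char split on ','. -/
def mySplit : List Char → List (List Char)
  | [] => [[]]
  | c :: rest =>
    if c = ',' then [] :: mySplit rest
    else
      match mySplit rest with
      | [] => [[c]]
      | h :: t => (c :: h) :: t

theorem mySplit_ne_nil (l : List Char) : mySplit l ≠ [] := by
  cases l with
  | nil => simp [mySplit]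
  | cons c rest =>
    simp only [mySplit]
    split <;> [simp; split <;> simp]

/-- Prepend to the first piece. -/
def consFirst (p : List Char) : List (List Char) → List (List Char)
  | [] => [p]
  | h :: t => (p ++ h) :: t

theorem go_eq_mySplit : ∀ (fuel : Nat) (l cur : List Char) (acc : List (List Char)),
    l.length ≤ fuel →
    PySem.Chars.splitOn.go [','] fuel l cur acc =
      acc.reverse ++ consFirst cur.reverse (mySplit l) := by
  intro fuel
  induction fuel with
  | zero =>
    intro l cur acc h
    have : l = [] := by cases l <;> simp_all
    subst this
    rw [PySem.Chars.splitOn.go.eq_def]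
    simp [mySplit, consFirst]
  | succ n ih =>
    intro l cur acc h
    cases l with
    | nil =>
      rw [PySem.Chars.splitOn.go.eq_def]
      simp [mySplit, consFirst]
    | cons c rest =>
      rw [PySem.Chars.splitOn.go.eq_def]
      simp only []
      by_cases hc : c = ','
      · subst hc
        have hp : [','].isPrefixOf (',' :: rest) = true := by simp [List.isPrefixOf]
        rw [if_pos hp]
        rw [show List.drop ([','].length) (',' :: rest) = rest from rfl]
        rw [ih rest [] (cur.reverse :: acc) (by simpa using Nat.le_of_succ_le_succ h)]
        simp only [mySplit]
        cases hms : mySplit rest with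
        | nil => exact absurd hms (mySplit_ne_nil rest)
        | cons mh mt => simp [consFirst]
      · have hp : [','].isPrefixOf (c :: rest) = false := by
          simp only [List.isPrefixOf, Bool.and_eq_false_iff, beq_eq_false_iff_ne, ne_eq]
          exact Or.inl fun e => hc e.symm
        rw [if_neg (by simp [hp])]
        rw [ih rest (c :: cur) acc (by simpa using Nat.le_of_succ_le_succ h)]
        simp only [mySplit, if_neg hc]
        cases hms : mySplit rest with
        | nil => exact absurd hms (mySplit_ne_nil rest)
        | cons mh mt => simp [consFirst]

theorem splitOn_comma_eq (l : List Char) : PySem.Chars.splitOn l [','] = mySplit l := by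
  unfold PySem.Chars.splitOn
  rw [go_eq_mySplit (l.length + 1) l [] [] (Nat.le_succ _)]
  cases hms : mySplit l with
  | nil => exact absurd hms (mySplit_ne_nil l)
  | cons h t => simp [consFirst]

/-- The per-chunk token pipeline shared by both sides, on code points. -/
def chunkTokens (cs : List Char) : List String :=
  ((mySplit cs).map (fun p => String.ofList (PySem.Chars.strip p))).filter (fun t => t ≠ "")

theorem strip_ofList (p : List Char) :
    PySem.Str.strip (String.ofList p) = String.ofList (PySem.Chars.strip p) := by
  simp [PySem.Str.strip]

theorem inner_fold_eq (parts : List (List Char)) (acc : List String) :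
    (parts.map String.ofList).foldl (fun values part =>
        let item := PySem.Str.strip part
        if item ≠ "" then values ++ [item] else values) acc
      = acc ++ (parts.map (fun p => String.ofList (PySem.Chars.strip p))).filter
          (fun t => t ≠ "") := by
  induction parts generalizing acc with
  | nil => simp
  | cons p ps ih =>
    simp only [List.map_cons, List.foldl_cons]
    rw [strip_ofList]
    by_cases h : String.ofList (PySem.Chars.strip p) = ""
    · rw [if_neg (by simp [h]), ih]
      simp [h]
    · rw [if_pos h, ih]
      simp [h]

theorem a_values_eq (lst : List String) :
    lst.foldl (fun values chunk =>
        ((PySem.Str.split? chunk ",").getD []).foldl (fun values part =>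
          let item := PySem.Str.strip part
          if item ≠ "" then values ++ [item] else values) values) []
      = lst.flatMap (fun chunk => chunkTokens chunk.toList) := by
  have hsplit : ∀ chunk : String, (PySem.Str.split? chunk ",").getD []
      = (mySplit chunk.toList).map String.ofList := by
    intro chunk
    simp [PySem.Str.split?, PySem.Chars.split?, splitOn_comma_eq]
  have hgen : ∀ (l : List String) (acc : List String), l.foldl (fun values chunk =>
        ((PySem.Str.split? chunk ",").getD []).foldl (fun values part =>
          let item := PySem.Str.strip part
          if item ≠ "" then values ++ [item] else values) values) acc
      = acc ++ l.flatMap (fun chunk => chunkTokens chunk.toList) := by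
    intro l
    induction l with
    | nil => simp
    | cons x xs ih =>
      intro acc
      simp only [List.foldl_cons, List.flatMap_cons, hsplit x, inner_fold_eq, ih,
        List.append_assoc, chunkTokens]
  simpa using hgen lst []

/-- The token (possibly none) contributed by one comma-separated piece. -/
def pieceTok (p : List Char) : List String :=
  if PySem.Chars.strip p = [] then [] else [String.ofList (PySem.Chars.strip p)]

theorem chunkTokens_eq_flatMap (cs : List Char) :
    chunkTokens cs = (mySplit cs).flatMap pieceTok := by
  unfold chunkTokens
  induction mySplit cs with
  | nil => rfl
  | cons p ps ih =>
    simp only [List.map_cons, List.filter_cons, List.flatMap_cons, pieceTok]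
    by_cases h : PySem.Chars.strip p = []
    · rw [if_pos h, if_neg (by simp [h]), List.nil_append, ih]
    · rw [if_neg h, if_pos (by simp [String.ofList_eq_empty_iff, h]), List.cons_append,
        List.nil_append, ih]

/-- Source B's inner loop, unrolled to a structural recursion on the characters. -/
def finish : List Char → List Char → List Char → List String
  | t, _, [] => if t = [] then [] else [String.ofList t]
  | t, p, c :: rest =>
    if c = ',' then (if t = [] then [] else [String.ofList t]) ++ finish [] [] rest
    else if PySem.Chars.isspace c then finish t (if t = [] then p else p ++ [c]) rest
    else finish (t ++ p ++ [c]) [] rest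

theorem fold_eq_finish : ∀ (cs : List Char) (v : List String) (t p : List Char),
    ((cs ++ [',']).foldl bstep (v, t, p)).1 = v ++ finish t p cs := by
  intro cs
  induction cs with
  | nil =>
    intro v t p
    by_cases h : t = [] <;> simp [bstep, finish, h]
  | cons c rest ih =>
    intro v t p
    simp only [List.cons_append, List.foldl_cons, bstep, finish]
    by_cases hc : c = ','
    · rw [if_pos hc, if_pos hc, ih]
      by_cases ht : t = [] <;> simp [ht]
    · rw [if_neg hc, if_neg hc]
      by_cases hs : PySem.Chars.isspace c
      · rw [if_pos hs, if_pos hs, ih]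
        by_cases ht : t = [] <;> simp [ht]
      · rw [if_neg hs, if_neg hs, ih]

theorem rstrip_of_all_ws (p : List Char) (h : ∀ c ∈ p, PySem.Chars.isspace c = true) :
    PySem.Chars.rstrip p = [] := by
  unfold PySem.Chars.rstrip
  rw [List.dropWhile_eq_nil_iff.2 (by intro c hc; exact h c (List.mem_reverse.1 hc))]
  rfl

theorem rstrip_append (a b : List Char) :
    PySem.Chars.rstrip (a ++ b)
      = if PySem.Chars.rstrip b = [] then PySem.Chars.rstrip a
        else a ++ PySem.Chars.rstrip b := by
  unfold PySem.Chars.rstrip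
  rw [List.reverse_append, List.dropWhile_append]
  by_cases h : List.dropWhile PySem.Chars.isspace b.reverse = []
  · simp [h]
  · simp [h, List.isEmpty_iff]

theorem rstrip_cons_not_ws (c : Char) (h : PySem.Chars.isspace c = false) (l : List Char) :
    PySem.Chars.rstrip (c :: l) = c :: PySem.Chars.rstrip l := by
  have := rstrip_append [c] l
  simp only [List.singleton_append] at this
  rw [this]
  by_cases hr : PySem.Chars.rstrip l = []
  · rw [if_pos hr, hr]
    unfold PySem.Chars.rstrip
    simp [h]
  · rw [if_neg hr]

theorem strip_cons_ws (c : Char) (h : PySem.Chars.isspace c = true) (l : List Char) :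
    PySem.Chars.strip (c :: l) = PySem.Chars.strip l := by
  unfold PySem.Chars.strip PySem.Chars.lstrip
  simp [h]

theorem strip_cons_not_ws (c : Char) (h : PySem.Chars.isspace c = false) (l : List Char) :
    PySem.Chars.strip (c :: l) = c :: PySem.Chars.rstrip l := by
  unfold PySem.Chars.strip PySem.Chars.lstrip
  rw [List.dropWhile_cons, if_neg (by simp [h])]
  exact rstrip_cons_not_ws c h l

/-- Invariant run of Source B's loop over one chunk equals the split/strip/filter tokens. -/
theorem finish_spec : ∀ (cs : List Char) (t p : List Char) (hd : List Char) (tl : List (List Char)),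
    mySplit cs = hd :: tl →
    (∀ c ∈ p, PySem.Chars.isspace c = true) →
    (t = [] → p = []) →
    finish t p cs
      = (if t = [] then pieceTok hd
         else [String.ofList (t ++ PySem.Chars.rstrip (p ++ hd))])
        ++ tl.flatMap pieceTok := by
  intro cs
  induction cs with
  | nil =>
    intro t p hd tl hsplit hp ht
    simp only [mySplit] at hsplit
    injection hsplit with h1 h2
    subst h1; subst h2
    by_cases h0 : t = []
    · simp [finish, h0, pieceTok, PySem.Chars.strip, PySem.Chars.lstrip, PySem.Chars.rstrip]
    · simp only [finish, if_neg h0, List.flatMap_nil, List.append_nil]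
      rw [rstrip_of_all_ws p hp, List.append_nil]
  | cons c cs ih =>
    intro t p hd tl hsplit hp ht
    by_cases hc : c = ','
    · subst hc
      simp only [mySplit] at hsplit
      injection hsplit with h1 h2
      subst h1; subst h2
      obtain ⟨hd', tl', hms⟩ : ∃ hd' tl', mySplit cs = hd' :: tl' := by
        cases hx : mySplit cs with
        | nil => exact absurd hx (mySplit_ne_nil cs)
        | cons a b => exact ⟨a, b, rfl⟩
      have hfin : finish t p (',' :: cs)
          = (if t = [] then [] else [String.ofList t]) ++ finish [] [] cs := by
        simp [finish]
      rw [hfin, ih [] [] hd' tl' hms (by simp) (fun _ => rfl), if_pos rfl, hms]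
      have hpe : pieceTok [] = [] := by
        simp [pieceTok, PySem.Chars.strip, PySem.Chars.lstrip, PySem.Chars.rstrip]
      by_cases h0 : t = []
      · simp [h0, hpe]
      · rw [if_neg h0, if_neg h0, List.append_nil, rstrip_of_all_ws p hp, List.append_nil]
        simp
    · obtain ⟨hd', tl', hms⟩ : ∃ hd' tl', mySplit cs = hd' :: tl' := by
        cases hx : mySplit cs with
        | nil => exact absurd hx (mySplit_ne_nil cs)
        | cons a b => exact ⟨a, b, rfl⟩
      simp only [mySplit, if_neg hc, hms] at hsplit
      injection hsplit with h1 h2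
      subst h1; subst h2
      by_cases hs : PySem.Chars.isspace c
      · simp only [finish, if_neg hc, if_pos hs]
        by_cases h0 : t = []
        · rw [if_pos h0, ih t p hd' tl' hms hp ht, if_pos h0, if_pos h0]
          rw [pieceTok, pieceTok, strip_cons_ws c hs hd']
        · rw [if_neg h0, ih t (p ++ [c]) hd' tl' hms
            (by intro x hx; rcases List.mem_append.1 hx with hx | hx
                · exact hp x hx
                · simp at hx; subst hx; exact hs)
            (fun he => absurd he h0)]
          rw [if_neg h0, if_neg h0, List.append_assoc]
          rfl
      · have hsf : PySem.Chars.isspace c = false := by simpa using hs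
        simp only [finish, if_neg hc, if_neg hs]
        rw [ih (t ++ p ++ [c]) [] hd' tl' hms (by simp) (by simp)]
        rw [if_neg (by simp), List.nil_append]
        by_cases h0 : t = []
        · rw [if_pos h0, h0, ht h0]
          simp only [List.nil_append]
          rw [pieceTok, strip_cons_not_ws c hsf hd']
          rw [if_neg (by simp)]
          rfl
        · rw [if_neg h0, rstrip_append p (c :: hd'), rstrip_cons_not_ws c hsf hd']
          rw [if_neg (by simp)]
          simp

theorem b_chunk_eq (chunk : String) (values : List String) :
    ((chunk.toList ++ [',']).foldl bstep (values, [], [])).1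
      = values ++ chunkTokens chunk.toList := by
  rw [fold_eq_finish]
  obtain ⟨hd, tl, hms⟩ : ∃ hd tl, mySplit chunk.toList = hd :: tl := by
    cases hx : mySplit chunk.toList with
    | nil => exact absurd hx (mySplit_ne_nil _)
    | cons a b => exact ⟨a, b, rfl⟩
  rw [finish_spec chunk.toList [] [] hd tl hms (by simp) (fun _ => rfl)]
  rw [chunkTokens_eq_flatMap, hms]
  simp

theorem b_values_eq (lst : List String) :
    lst.foldl (fun values chunk =>
        ((chunk.toList ++ [',']).foldl bstep (values, [], [])).1) []
      = lst.flatMap (fun chunk => chunkTokens chunk.toList) := by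
  have hgen : ∀ (l : List String) (acc : List String),
      l.foldl (fun values chunk =>
        ((chunk.toList ++ [',']).foldl bstep (values, [], [])).1) acc
      = acc ++ l.flatMap (fun chunk => chunkTokens chunk.toList) := by
    intro l
    induction l with
    | nil => simp
    | cons x xs ih =>
      intro acc
      rw [List.foldl_cons, b_chunk_eq, ih, List.flatMap_cons, List.append_assoc]
  simpa using hgen lst []

-- ===== VERDICT (by name: the statement is the Claim_ definition above) =====
theorem split_multi_values_py_spec : Claim_equal_split_multi_values_py := by
  intro raw_values _
  unfold Spec_split_multi_values_py split_multi_values_py split_multi_values_py_alt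
  cases raw_values with
  | none => rfl
  | some lst =>
    cases lst with
    | nil => rfl
    | cons x xs =>
      simp only [List.isEmpty_cons, if_neg (by simp : ¬(false = true))]
      rw [a_values_eq, b_values_eq]
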